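-- pv_equiv track=rewrite | github.com/Choupette007/SOLOTradingBot | solana_trading_bot_bundle/trading_bot/eligibility.py | _canon_bucket_for
-- ===== SOURCE A (Python) =====
-- from typing import Any, Dict, List, Optional, Set, Tuple
--
-- _BUCKET_SYNONYMS: Dict[str, Set[str]] = {
--     "high": {"high", "high_cap", "large", "large_cap"},
--     "mid": {"mid", "mid_cap", "medium", "medium_cap"},
--     "low": {"low", "low_cap", "small", "small_cap"},
--     "new": {"new", "newly_launched", "newly_listed", "new_tokens"},
-- }
--
-- def _canon_bucket_for(categories: List[str]) -> Optional[str]: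
--     if not categories:
--         return None
--     cats = {str(c).lower().strip() for c in categories}
--     for canon, syns in _BUCKET_SYNONYMS.items():
--         if cats & syns:
--             return canon
--     return None
-- ===== SOURCE B (Python) =====
-- _PRIORITY = ["high", "mid", "low", "new"]
--
-- _SYN_RANK = {
--     "high": 0, "high_cap": 0, "large": 0, "large_cap": 0,
--     "mid": 1, "mid_cap": 1, "medium": 1, "medium_cap": 1,
--     "low": 2, "low_cap": 2, "small": 2, "small_cap": 2,
--     "new": 3, "newly_launched": 3, "newly_listed": 3, "new_tokens": 3,
-- }
--
-- def _canon_bucket_for(categories):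
--     best = None
--     for c in categories:
--         r = _SYN_RANK.get(str(c).lower().strip())
--         if r is not None and (best is None or r < best):
--             best = r
--     return None if best is None else _PRIORITY[best]
-- ===== Notes on version B (the rewrite author's own statement) =====
-- stated objective: idiomatic
-- what changed: A builds a set of normalized categories and tests it against each bucket's synonym set in priority order; B makes one pass over the categories, looking each normalized category up in a flat synonym-to-rank dict and keeping the minimal rank, then returns that rank's bucket name.
import Mathlib
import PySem

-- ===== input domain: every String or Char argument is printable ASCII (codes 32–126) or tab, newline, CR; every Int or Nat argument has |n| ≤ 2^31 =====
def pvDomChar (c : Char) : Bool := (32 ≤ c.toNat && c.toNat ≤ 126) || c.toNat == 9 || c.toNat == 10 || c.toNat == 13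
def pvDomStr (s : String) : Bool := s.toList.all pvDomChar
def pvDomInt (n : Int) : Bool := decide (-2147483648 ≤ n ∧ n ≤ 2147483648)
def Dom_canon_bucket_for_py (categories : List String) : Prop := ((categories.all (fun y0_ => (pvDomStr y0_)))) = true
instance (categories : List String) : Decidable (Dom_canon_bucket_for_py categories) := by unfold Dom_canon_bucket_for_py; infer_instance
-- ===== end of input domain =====

-- B replaces A's bucket-by-bucket set intersections with one pass over the categories keeping the
-- minimal bucket rank found in a flat synonym→rank dict (idiomatic/alternative; same cost class).

-- shared normalization: str(c).lower().strip()
def pvNorm (c : String) : String := PySem.Str.strip (PySem.Str.lower c)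

-- ===== PORT A =====
-- the synonym sets of _BUCKET_SYNONYMS (Python set literals; only membership is used)
def pvSynsHigh : PySem.Set String := PySem.Set.ofList ["high", "high_cap", "large", "large_cap"]
def pvSynsMid : PySem.Set String := PySem.Set.ofList ["mid", "mid_cap", "medium", "medium_cap"]
def pvSynsLow : PySem.Set String := PySem.Set.ofList ["low", "low_cap", "small", "small_cap"]
def pvSynsNew : PySem.Set String := PySem.Set.ofList ["new", "newly_launched", "newly_listed", "new_tokens"]

def canon_bucket_for_py (categories : List String) : Option String :=
  if categories = [] then none
  else
    let cats : PySem.Set String := PySem.Set.ofList (categories.map pvNorm)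
    -- for canon, syns in _BUCKET_SYNONYMS.items(): if cats & syns: return canon
    if PySem.Set.inter cats pvSynsHigh ≠ [] then some "high"
    else if PySem.Set.inter cats pvSynsMid ≠ [] then some "mid"
    else if PySem.Set.inter cats pvSynsLow ≠ [] then some "low"
    else if PySem.Set.inter cats pvSynsNew ≠ [] then some "new"
    else none

-- ===== PORT B =====
def pvPriority : List String := ["high", "mid", "low", "new"]

def pvSynRank : PySem.Dict String Int := PySem.Dict.mk
  [("high", 0), ("high_cap", 0), ("large", 0), ("large_cap", 0),
   ("mid", 1), ("mid_cap", 1), ("medium", 1), ("medium_cap", 1),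
   ("low", 2), ("low_cap", 2), ("small", 2), ("small_cap", 2),
   ("new", 3), ("newly_launched", 3), ("newly_listed", 3), ("new_tokens", 3)]

def canon_bucket_for_py_alt (categories : List String) : Option String :=
  let best : Option Int := categories.foldl (fun best c =>
    match pvSynRank.get? (pvNorm c) with
    | none => best
    | some r => match best with
      | none => some r
      | some b => if r < b then some r else best) none
  match best with
  | none => none
  | some b => PySem.List.pyGet? pvPriority b   -- _PRIORITY[best]; best is always in range

-- ===== PRECONDITION & SPEC =====
def Spec_canon_bucket_for_py (categories : List String) (out : Option String) : Prop := out = canon_bucket_for_py_alt categories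
instance (categories : List String) (out : Option String) : Decidable (Spec_canon_bucket_for_py categories out) := by unfold Spec_canon_bucket_for_py; infer_instance

-- ===== CLAIM (what is proved, stated in full; the proofs are below) =====
def Claim_equal_canon_bucket_for_py : Prop := ∀ (categories : List String), Dom_canon_bucket_for_py categories → Spec_canon_bucket_for_py categories (canon_bucket_for_py categories)

-- ===== LEMMAS AND PROOFS =====

-- the minimum-accumulator step of B's loop
def pvOStep (b : Option Int) (r : Int) : Option Int :=
  match b with
  | none => some r
  | some x => if r < x then some r else b

-- the ranks that B's loop sees
def pvRanks (categories : List String) : List Int :=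
  categories.filterMap (fun c => pvSynRank.get? (pvNorm c))

theorem pvFold_eq_ranks (categories : List String) (acc : Option Int) :
    categories.foldl (fun best c =>
      match pvSynRank.get? (pvNorm c) with
      | none => best
      | some r => match best with
        | none => some r
        | some b => if r < b then some r else best) acc
      = (pvRanks categories).foldl pvOStep acc := by
  induction categories generalizing acc with
  | nil => simp [pvRanks]
  | cons c cs ih =>
    simp only [pvRanks, List.filterMap_cons, List.foldl_cons]
    cases h : pvSynRank.get? (pvNorm c) <;> simp [*, pvRanks, pvOStep]

theorem pvFold_none_iff (l : List Int) (acc : Option Int) :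
    l.foldl pvOStep acc = none ↔ acc = none ∧ l = [] := by
  induction l generalizing acc with
  | nil => simp
  | cons x xs ih =>
    simp only [List.foldl_cons, ih]
    constructor
    · rintro ⟨h, rfl⟩
      cases acc with
      | none => simp [pvOStep] at h
      | some a => simp [pvOStep] at h; split at h <;> simp_all
    · rintro ⟨_, h⟩; simp at h

theorem pvFold_min (l : List Int) (acc : Option Int) (v : Int)
    (h : l.foldl pvOStep acc = some v) :
    ((acc = some v ∨ v ∈ l) ∧ (∀ a, acc = some a → v ≤ a) ∧ ∀ x ∈ l, v ≤ x) := by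
  induction l generalizing acc with
  | nil => simp_all
  | cons x xs ih =>
    simp only [List.foldl_cons] at h
    obtain ⟨hmem, hacc, hall⟩ := ih (pvOStep acc x) h
    have hvx : v ≤ x ∧ (∀ a, acc = some a → v ≤ a) := by
      cases acc with
      | none =>
        have := hacc x (by simp [pvOStep])
        exact ⟨this, by simp⟩
      | some a =>
        by_cases hlt : x < a
        · have := hacc x (by simp [pvOStep, hlt])
          exact ⟨this, fun b hb => by simp at hb; omega⟩
        · have := hacc a (by simp [pvOStep, hlt])
          exact ⟨by omega, fun b hb => by simp at hb; omega⟩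
    refine ⟨?_, hvx.2, ?_⟩
    · rcases hmem with h1 | h1
      · cases acc with
        | none => simp [pvOStep] at h1; simp [h1]
        | some a =>
          simp only [pvOStep] at h1
          split at h1 <;> simp_all
      · simp [h1]
    · intro y hy
      rcases List.mem_cons.mp hy with rfl | hy
      · exact hvx.1
      · exact hall _ hy

-- rank characterization: which strings map to which rank
def pvAllSyns : List String := ["high", "high_cap", "large", "large_cap", "mid", "mid_cap", "medium", "medium_cap", "low", "low_cap", "small", "small_cap", "new", "newly_launched", "newly_listed", "new_tokens"]

theorem pvRank_none (t : String) (hm : t ∉ pvAllSyns) : pvSynRank.get? t = none := by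
  simp only [pvAllSyns, List.mem_cons, not_or, List.not_mem_nil, not_false_iff, and_true] at hm
  obtain ⟨h1, h2, h3, h4, h5, h6, h7, h8, h9, h10, h11, h12, h13, h14, h15, h16⟩ := hm
  simp only [pvSynRank, PySem.Dict.get?_mk_cons, beq_iff_eq, if_neg (Ne.symm h1), if_neg (Ne.symm h2), if_neg (Ne.symm h3), if_neg (Ne.symm h4), if_neg (Ne.symm h5), if_neg (Ne.symm h6), if_neg (Ne.symm h7), if_neg (Ne.symm h8), if_neg (Ne.symm h9), if_neg (Ne.symm h10), if_neg (Ne.symm h11), if_neg (Ne.symm h12), if_neg (Ne.symm h13), if_neg (Ne.symm h14), if_neg (Ne.symm h15), if_neg (Ne.symm h16)]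
  rfl

theorem pvRank_cases (t : String) (r : Int) (h : pvSynRank.get? t = some r) :
    r = 0 ∨ r = 1 ∨ r = 2 ∨ r = 3 := by
  by_cases hm : t ∈ pvAllSyns
  · simp only [pvAllSyns, List.mem_cons, List.not_mem_nil, or_false] at hm
    rcases hm with rfl|rfl|rfl|rfl|rfl|rfl|rfl|rfl|rfl|rfl|rfl|rfl|rfl|rfl|rfl|rfl <;>
      simp_all [pvSynRank, PySem.Dict.get?_mk_cons]
  · rw [pvRank_none t hm] at h; exact absurd h (by simp)

theorem pvRank_high (t : String) : pvSynRank.get? t = some 0 ↔ t ∈ pvSynsHigh := by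
  by_cases hm : t ∈ pvAllSyns
  · simp only [pvAllSyns, List.mem_cons, List.not_mem_nil, or_false] at hm
    rcases hm with rfl|rfl|rfl|rfl|rfl|rfl|rfl|rfl|rfl|rfl|rfl|rfl|rfl|rfl|rfl|rfl <;> decide
  · rw [pvRank_none t hm]
    simp only [pvAllSyns, List.mem_cons, not_or, List.not_mem_nil, not_false_iff, and_true] at hm
    simp [pvSynsHigh, PySem.Set.mem_ofList]
    tauto

theorem pvRank_mid (t : String) : pvSynRank.get? t = some 1 ↔ t ∈ pvSynsMid := by
  by_cases hm : t ∈ pvAllSyns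
  · simp only [pvAllSyns, List.mem_cons, List.not_mem_nil, or_false] at hm
    rcases hm with rfl|rfl|rfl|rfl|rfl|rfl|rfl|rfl|rfl|rfl|rfl|rfl|rfl|rfl|rfl|rfl <;> decide
  · rw [pvRank_none t hm]
    simp only [pvAllSyns, List.mem_cons, not_or, List.not_mem_nil, not_false_iff, and_true] at hm
    simp [pvSynsMid, PySem.Set.mem_ofList]
    tauto

theorem pvRank_low (t : String) : pvSynRank.get? t = some 2 ↔ t ∈ pvSynsLow := by
  by_cases hm : t ∈ pvAllSyns
  · simp only [pvAllSyns, List.mem_cons, List.not_mem_nil, or_false] at hm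
    rcases hm with rfl|rfl|rfl|rfl|rfl|rfl|rfl|rfl|rfl|rfl|rfl|rfl|rfl|rfl|rfl|rfl <;> decide
  · rw [pvRank_none t hm]
    simp only [pvAllSyns, List.mem_cons, not_or, List.not_mem_nil, not_false_iff, and_true] at hm
    simp [pvSynsLow, PySem.Set.mem_ofList]
    tauto

theorem pvRank_new (t : String) : pvSynRank.get? t = some 3 ↔ t ∈ pvSynsNew := by
  by_cases hm : t ∈ pvAllSyns
  · simp only [pvAllSyns, List.mem_cons, List.not_mem_nil, or_false] at hm
    rcases hm with rfl|rfl|rfl|rfl|rfl|rfl|rfl|rfl|rfl|rfl|rfl|rfl|rfl|rfl|rfl|rfl <;> decide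
  · rw [pvRank_none t hm]
    simp only [pvAllSyns, List.mem_cons, not_or, List.not_mem_nil, not_false_iff, and_true] at hm
    simp [pvSynsNew, PySem.Set.mem_ofList]
    tauto

-- A's intersection test for bucket i ↔ some category normalizes into the bucket's synonym set
theorem pvInter_iff (categories : List String) (syns : PySem.Set String) :
    PySem.Set.inter (PySem.Set.ofList (categories.map pvNorm)) syns ≠ [] ↔
      ∃ c ∈ categories, pvNorm c ∈ syns := by
  constructor
  · intro hne
    obtain ⟨x, hx⟩ := List.exists_mem_of_ne_nil _ hne
    rw [PySem.Set.mem_inter, PySem.Set.mem_ofList, List.mem_map] at hx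
    obtain ⟨⟨c, hc, rfl⟩, hs⟩ := hx
    exact ⟨c, hc, hs⟩
  · rintro ⟨c, hc, hs⟩ he
    have hmem : pvNorm c ∈ PySem.Set.inter (PySem.Set.ofList (categories.map pvNorm)) syns := by
      rw [PySem.Set.mem_inter, PySem.Set.mem_ofList]
      exact ⟨List.mem_map_of_mem hc, hs⟩
    rw [he] at hmem
    simp at hmem

-- rank i occurs in pvRanks ↔ some category normalizes into bucket i's synonym set
theorem pvMem_ranks (categories : List String) (r : Int) :
    r ∈ pvRanks categories ↔ ∃ c ∈ categories, pvSynRank.get? (pvNorm c) = some r := by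
  simp [pvRanks, List.mem_filterMap]

-- hit lemmas: A's bucket test ↔ the bucket's rank occurs among pvRanks
theorem pvHit_high (categories : List String) :
    (∃ c ∈ categories, pvNorm c ∈ pvSynsHigh) ↔ (0 : Int) ∈ pvRanks categories := by
  simp only [pvMem_ranks, pvRank_high]

theorem pvHit_mid (categories : List String) :
    (∃ c ∈ categories, pvNorm c ∈ pvSynsMid) ↔ (1 : Int) ∈ pvRanks categories := by
  simp only [pvMem_ranks, pvRank_mid]

theorem pvHit_low (categories : List String) :
    (∃ c ∈ categories, pvNorm c ∈ pvSynsLow) ↔ (2 : Int) ∈ pvRanks categories := by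
  simp only [pvMem_ranks, pvRank_low]

theorem pvHit_new (categories : List String) :
    (∃ c ∈ categories, pvNorm c ∈ pvSynsNew) ↔ (3 : Int) ∈ pvRanks categories := by
  simp only [pvMem_ranks, pvRank_new]

theorem pvRanks_bound (categories : List String) (x : Int) (hx : x ∈ pvRanks categories) :
    x = 0 ∨ x = 1 ∨ x = 2 ∨ x = 3 := by
  rw [pvMem_ranks] at hx
  obtain ⟨c, -, h⟩ := hx
  exact pvRank_cases _ _ h

theorem pvFold_eq_of_min (l : List Int) (r : Int) (hr : r ∈ l) (hlow : ∀ x ∈ l, r ≤ x) :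
    l.foldl pvOStep none = some r := by
  cases hm : l.foldl pvOStep none with
  | none =>
    rw [pvFold_none_iff] at hm
    rw [hm.2] at hr
    simp at hr
  | some v =>
    obtain ⟨hv, -, hall⟩ := pvFold_min l none v hm
    rcases hv with h | h
    · simp at h
    · have h1 := hall r hr
      have h2 := hlow v h
      have : v = r := by omega
      rw [this]

-- B as min-of-ranks
theorem pvAlt_eq (categories : List String) :
    canon_bucket_for_py_alt categories =
      match (pvRanks categories).foldl pvOStep none with
      | none => none
      | some b => PySem.List.pyGet? pvPriority b := by
  unfold canon_bucket_for_py_alt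
  simp only [pvFold_eq_ranks]

-- ===== VERDICT (by name: the statement is the Claim_ definition above) =====
theorem canon_bucket_for_py_spec : Claim_equal_canon_bucket_for_py := by
  intro categories _
  unfold Spec_canon_bucket_for_py
  rw [pvAlt_eq]
  unfold canon_bucket_for_py
  by_cases hnil : categories = []
  · rw [if_pos hnil, hnil]
    simp [pvRanks]
  · rw [if_neg hnil]
    simp only []
    by_cases h0 : ∃ c ∈ categories, pvNorm c ∈ pvSynsHigh
    · rw [if_pos ((pvInter_iff _ _).mpr h0)]
      rw [pvFold_eq_of_min _ 0 ((pvHit_high categories).mp h0)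
        (fun x hx => by rcases pvRanks_bound categories x hx with h|h|h|h <;> omega)]
      rfl
    · rw [if_neg (fun hc => h0 ((pvInter_iff _ _).mp hc))]
      by_cases h1 : ∃ c ∈ categories, pvNorm c ∈ pvSynsMid
      · rw [if_pos ((pvInter_iff _ _).mpr h1)]
        rw [pvFold_eq_of_min _ 1 ((pvHit_mid categories).mp h1)
          (fun x hx => by
            have hne : x ≠ 0 := fun he => h0 ((pvHit_high categories).mpr (he ▸ hx))
            rcases pvRanks_bound categories x hx with h|h|h|h <;> omega)]
        rfl
      · rw [if_neg (fun hc => h1 ((pvInter_iff _ _).mp hc))]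
        by_cases h2 : ∃ c ∈ categories, pvNorm c ∈ pvSynsLow
        · rw [if_pos ((pvInter_iff _ _).mpr h2)]
          rw [pvFold_eq_of_min _ 2 ((pvHit_low categories).mp h2)
            (fun x hx => by
              have hne0 : x ≠ 0 := fun he => h0 ((pvHit_high categories).mpr (he ▸ hx))
              have hne1 : x ≠ 1 := fun he => h1 ((pvHit_mid categories).mpr (he ▸ hx))
              rcases pvRanks_bound categories x hx with h|h|h|h <;> omega)]
          rfl
        · rw [if_neg (fun hc => h2 ((pvInter_iff _ _).mp hc))]
          by_cases h3 : ∃ c ∈ categories, pvNorm c ∈ pvSynsNew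
          · rw [if_pos ((pvInter_iff _ _).mpr h3)]
            rw [pvFold_eq_of_min _ 3 ((pvHit_new categories).mp h3)
              (fun x hx => by
                have hne0 : x ≠ 0 := fun he => h0 ((pvHit_high categories).mpr (he ▸ hx))
                have hne1 : x ≠ 1 := fun he => h1 ((pvHit_mid categories).mpr (he ▸ hx))
                have hne2 : x ≠ 2 := fun he => h2 ((pvHit_low categories).mpr (he ▸ hx))
                rcases pvRanks_bound categories x hx with h|h|h|h <;> omega)]
            rfl
          · rw [if_neg (fun hc => h3 ((pvInter_iff _ _).mp hc))]
            have hempty : pvRanks categories = [] := by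
              rw [List.eq_nil_iff_forall_not_mem]
              intro x hx
              rcases pvRanks_bound categories x hx with h|h|h|h
              · exact h0 ((pvHit_high categories).mpr (h ▸ hx))
              · exact h1 ((pvHit_mid categories).mpr (h ▸ hx))
              · exact h2 ((pvHit_low categories).mpr (h ▸ hx))
              · exact h3 ((pvHit_new categories).mpr (h ▸ hx))
            rw [hempty]
            rfl
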